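-- pv_equiv track=rewrite | github.com/ZhangShaozuo/Beam_Search | preprocess.py | preprocess_nmt
-- ===== SOURCE A (Python) =====
-- def preprocess_nmt(text):
--     '''Preprocess the Any-English dataset.'''
--     def no_space(char, prev_char):
--         '''Check whether it is a sign and there is no space before'''
--         return char in set(',.!?') and prev_char != ' '
--
--     '''Replace non-breaking space with space, and convert uppercase letters to lowercase ones'''
--     '''Note that Chinese characters don't have space in between'''
--     text = text.replace('\u202f', ' ').replace('\xa0', ' ').lower()
--     '''Insert space between words and punctuation marks'''
--     out = [' ' + char if i > 0 and no_space(char, text[i - 1]) else char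
--            for i, char in enumerate(text)]
--     return ''.join(out)
-- ===== SOURCE B (Python) =====
-- def preprocess_nmt(text):
--     '''Preprocess the Any-English dataset.'''
--     text = text.replace('\u202f', ' ').replace('\xa0', ' ').lower()
--     # Tokenize on single spaces: inside a token there is no space, so every
--     # punctuation mark except a token's very first character needs a space;
--     # a punctuation mark opening a token had a space (or nothing) before it.
--     def fix(tok):
--         return tok[:1] + ''.join(' ' + c if c in ',.!?' else c for c in tok[1:])
--     return ' '.join(fix(tok) for tok in text.split(' '))
-- ===== Notes on version B (the rewrite author's own statement) =====
-- stated objective: alternative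
-- what changed: Replaces A's indexed scan that checks the previous character before each punctuation mark by a tokenize-transform-rejoin pipeline: split on ' ', unconditionally insert a space before every punctuation char except a token's first character, and rejoin with ' ' - the prev-char test disappears because tokens contain no spaces.
import Mathlib
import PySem

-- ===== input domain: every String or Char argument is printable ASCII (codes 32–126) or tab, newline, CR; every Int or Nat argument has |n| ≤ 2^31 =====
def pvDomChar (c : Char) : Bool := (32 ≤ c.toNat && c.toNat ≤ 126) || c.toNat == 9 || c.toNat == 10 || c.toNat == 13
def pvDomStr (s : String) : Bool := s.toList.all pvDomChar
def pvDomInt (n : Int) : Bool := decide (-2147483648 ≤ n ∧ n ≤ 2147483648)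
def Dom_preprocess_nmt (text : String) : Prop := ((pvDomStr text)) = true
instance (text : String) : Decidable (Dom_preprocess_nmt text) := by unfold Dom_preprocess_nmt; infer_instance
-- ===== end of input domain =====

-- B replaces A's prev-char-guarded scan by split-on-space / per-token insertion / rejoin
-- (an alternative decomposition of the same linear-time task).

-- ===== PORT A =====
-- inner helper no_space(char, prev_char)
def pvNoSpace (ch prev_char : Char) : Bool :=
  decide (ch ∈ PySem.Set.ofList (",.!?".toList)) && (prev_char != ' ')

def preprocess_nmt (text : String) : String :=
  let t := PySem.Str.lower (PySem.Str.replace (PySem.Str.replace text "\u202f" " ") "\u00a0" " ")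
  let cs := t.toList
  -- text[i - 1] is guarded by i > 0, hence always in range: pyGetD's default is never read
  let out := (PySem.List.enumerate cs).map (fun ic =>
    if ic.1 > 0 ∧ pvNoSpace ic.2 (PySem.List.pyGetD cs (ic.1 - 1) ' ') then [' ', ic.2] else [ic.2])
  String.ofList (PySem.Chars.join [] out)

-- ===== PORT B =====
-- fix(tok) = tok[:1] + ''.join(' ' + c if c in ',.!?' else c for c in tok[1:])
def pvFix (tok : List Char) : List Char :=
  PySem.Chars.slice tok none (some 1) ++
    PySem.Chars.join [] ((PySem.Chars.slice tok (some 1) none).map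
      (fun c => if PySem.Chars.isIn [c] (",.!?".toList) then [' ', c] else [c]))

def preprocess_nmt_alt (text : String) : String :=
  let t := PySem.Str.lower (PySem.Str.replace (PySem.Str.replace text "\u202f" " ") "\u00a0" " ")
  String.ofList (PySem.Chars.join [' '] ((PySem.Chars.splitOn t.toList (" ".toList)).map pvFix))

-- ===== PRECONDITION & SPEC =====
def Spec_preprocess_nmt (text : String) (out : String) : Prop := out = preprocess_nmt_alt text
instance (text : String) (out : String) : Decidable (Spec_preprocess_nmt text out) := by unfold Spec_preprocess_nmt; infer_instance

-- ===== CLAIM (what is proved, stated in full; the proofs are below) =====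
def Claim_equal_preprocess_nmt : Prop := ∀ (text : String), Dom_preprocess_nmt text → Spec_preprocess_nmt text (preprocess_nmt text)

-- ===== LEMMAS AND PROOFS =====

-- proof-side normal forms
def pvPunct (c : Char) : Bool := c == ',' || c == '.' || c == '!' || c == '?'

-- A's scan, with the previous character carried along
def pvSp : Char → List Char → List Char
  | _, [] => []
  | p, c :: r => (if pvPunct c && p != ' ' then [' ', c] else [c]) ++ pvSp c r

-- split on ' ' as (first token, remaining tokens)
def pvSplitP : List Char → List Char × List (List Char)
  | [] => ([], [])
  | c :: r =>
    let pr := pvSplitP r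
    if c = ' ' then ([], pr.1 :: pr.2) else (c :: pr.1, pr.2)

def pvInsB (c : Char) : List Char := if pvPunct c then [' ', c] else [c]
def pvFixL (t : List Char) : List Char := t.take 1 ++ (t.drop 1).flatMap pvInsB
def pvTailB (ts : List (List Char)) : List Char := ts.flatMap (fun t => ' ' :: pvFixL t)

lemma pvMemPunct (c : Char) : decide (c ∈ (",.!?".toList)) = pvPunct c := by
  show decide (c ∈ [',', '.', '!', '?']) = pvPunct c
  by_cases h : c ∈ [',', '.', '!', '?']
  · rw [decide_eq_true h]
    simp only [List.mem_cons, List.not_mem_nil, or_false] at h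
    rcases h with h | h | h | h <;> simp [pvPunct, h]
  · rw [decide_eq_false h]
    simp only [List.mem_cons, List.not_mem_nil, or_false, not_or] at h
    simp [pvPunct, h.1, h.2.1, h.2.2.1, h.2.2.2]

lemma pvNoSpace_eq (ch p : Char) : pvNoSpace ch p = (pvPunct ch && p != ' ') := by
  unfold pvNoSpace
  rw [show (decide (ch ∈ PySem.Set.ofList (",.!?".toList)) : Bool)
        = decide (ch ∈ (",.!?".toList)) from by simp [PySem.Set.mem_ofList]]
  rw [pvMemPunct]

lemma pvIsIn_eq (c : Char) : PySem.Chars.isIn [c] (",.!?".toList) = pvPunct c := by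
  rw [← pvMemPunct]
  by_cases h : c ∈ (",.!?".toList)
  · rw [decide_eq_true h, (PySem.Chars.isIn_iff_infix [c] _).2 ((List.singleton_infix_iff c _).2 h)]
  · rw [decide_eq_false h, PySem.Chars.isIn_eq_false_iff]
    rw [List.singleton_infix_iff]; exact h

lemma pvJoinFlatten (parts : List (List Char)) :
    PySem.Chars.join [] parts = parts.flatten := by
  show [].intercalate parts = parts.flatten
  induction parts with
  | nil => rfl
  | cons x xs ih =>
    cases xs with
    | nil => simp [List.intercalate, List.intersperse]
    | cons y ys =>
      unfold List.intercalate at *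
      rw [List.intersperse_cons₂]
      simp_all

lemma pvJoinSpace (x : List Char) (xs : List (List Char)) :
    PySem.Chars.join [' '] (x :: xs) = x ++ xs.flatMap (fun t => ' ' :: t) := by
  induction xs generalizing x with
  | nil => simp [PySem.Chars.join, List.intercalate, List.intersperse]
  | cons y ys ih =>
    have ih' := ih y
    show [' '].intercalate (x :: y :: ys) = _
    rw [List.intercalate, List.intersperse_cons₂, List.flatten_cons, List.flatten_cons]
    rw [show (List.intersperse [' '] (y :: ys)).flatten
          = PySem.Chars.join [' '] (y :: ys) from rfl, ih']
    simp

-- B's fix equals its list-level normal form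
lemma pvFix_eq (tok : List Char) : pvFix tok = pvFixL tok := by
  unfold pvFix pvFixL
  rw [PySem.Chars.slice_eq_listSlice, PySem.Chars.slice_eq_listSlice,
      PySem.List.slice_to tok (by norm_num : (0:Int) ≤ 1),
      PySem.List.slice_from tok (by norm_num : (0:Int) ≤ 1)]
  rw [pvJoinFlatten, ← List.flatMap_def]
  have hif : ∀ c : Char,
      (if PySem.Chars.isIn [c] (",.!?".toList) = true then ([' ', c] : List Char) else [c]) = pvInsB c := by
    intro c; rw [pvIsIn_eq]; rfl
  simp only [hif, Int.toNat_one]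

-- A's indexed scan over a suffix equals the prev-char scan pvSp
lemma pvCore : ∀ (suf pre : List Char) (p : Char),
    (PySem.List.enumerate suf ((pre.length : Int) + 1)).flatMap
        (fun ic => if ic.1 > 0 ∧ pvNoSpace ic.2 (PySem.List.pyGetD (pre ++ p :: suf) (ic.1 - 1) ' ')
                   then [' ', ic.2] else [ic.2])
      = pvSp p suf := by
  intro suf
  induction suf with
  | nil => intro pre p; simp [PySem.List.enumerate, pvSp]
  | cons q suf' ih =>
    intro pre p
    rw [PySem.List.enumerate_cons]
    have hget : PySem.List.pyGetD (pre ++ p :: q :: suf') (((pre.length : Int) + 1) - 1) ' ' = p := by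
      have h1 : ((pre.length : Int) + 1) - 1 = ((pre.length : Nat) : Int) := by omega
      rw [h1, PySem.List.pyGetD_natCast]
      simp [List.getD]
    have hih := ih (pre ++ [p]) q
    simp only [List.length_append, List.length_cons, List.length_nil,
      List.append_assoc, List.singleton_append] at hih
    push_cast at hih
    rw [List.flatMap_cons, hget]
    have hpos : ((pre.length : Int) + 1) > 0 := by positivity
    have hcond : (if ((pre.length : Int) + 1) > 0 ∧ pvNoSpace q p then ([' ', q] : List Char) else [q])
        = if pvPunct q && p != ' ' then [' ', q] else [q] := by
      simp [hpos, pvNoSpace_eq]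
    rw [hcond]
    show _ = pvSp p (q :: suf')
    unfold pvSp
    congr 1

-- splitOn.go on sep = [' '] computes pvSplitP
lemma pvGo : ∀ (l cur : List Char) (acc : List (List Char)) (fuel : Nat), l.length < fuel →
    PySem.Chars.splitOn.go [' '] fuel l cur acc
      = acc.reverse ++ (cur.reverse ++ (pvSplitP l).1) :: (pvSplitP l).2 := by
  intro l
  induction l with
  | nil =>
    intro cur acc fuel hf
    match fuel, hf with
    | fuel + 1, _ =>
      simp [PySem.Chars.splitOn.go, pvSplitP]
  | cons c rest ih =>
    intro cur acc fuel hf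
    match fuel, hf with
    | fuel + 1, hf =>
      by_cases hc : c = ' '
      · subst hc
        rw [show PySem.Chars.splitOn.go [' '] (fuel + 1) (' ' :: rest) cur acc
              = PySem.Chars.splitOn.go [' '] fuel rest [] (cur.reverse :: acc) from by
            simp [PySem.Chars.splitOn.go, List.isPrefixOf]]
        rw [ih [] (cur.reverse :: acc) fuel (by simpa using Nat.lt_of_succ_lt_succ hf)]
        simp [pvSplitP]
      · have hc' : ¬ (' ' = c) := fun h => hc h.symm
        rw [show PySem.Chars.splitOn.go [' '] (fuel + 1) (c :: rest) cur acc
              = PySem.Chars.splitOn.go [' '] fuel rest (c :: cur) acc from by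
            simp [PySem.Chars.splitOn.go, List.isPrefixOf, hc']]
        rw [ih (c :: cur) acc fuel (by simpa using Nat.lt_of_succ_lt_succ hf)]
        simp [pvSplitP, hc]

lemma pvSplit_eq (l : List Char) :
    PySem.Chars.splitOn l [' '] = (pvSplitP l).1 :: (pvSplitP l).2 := by
  unfold PySem.Chars.splitOn
  rw [pvGo l [] [] (l.length + 1) (Nat.lt_succ_self _)]
  simp

-- the heart: A's prev-char scan = B's per-token transform, in both prev-states
lemma pvMain : ∀ (r : List Char),
    (∀ p, p ≠ ' ' → pvSp p r = (pvSplitP r).1.flatMap pvInsB ++ pvTailB (pvSplitP r).2)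
    ∧ pvSp ' ' r = pvFixL (pvSplitP r).1 ++ pvTailB (pvSplitP r).2 := by
  intro r
  induction r with
  | nil => exact ⟨fun p _ => rfl, rfl⟩
  | cons c r' ih =>
    by_cases hc : c = ' '
    · subst hc
      have h2 := ih.2
      constructor
      · intro p hp
        show (if pvPunct ' ' && p != ' ' then [' ', ' '] else [' ']) ++ pvSp ' ' r' = _
        rw [show pvPunct ' ' = false from rfl]
        simp only [Bool.false_and, if_neg (by simp : ¬ (false = true)), List.singleton_append]
        rw [h2]
        simp [pvSplitP, pvTailB]
      · show (if pvPunct ' ' && ' ' != ' ' then [' ', ' '] else [' ']) ++ pvSp ' ' r' = _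
        rw [show pvPunct ' ' = false from rfl]
        simp only [Bool.false_and, if_neg (by simp : ¬ (false = true)), List.singleton_append]
        rw [h2]
        simp [pvSplitP, pvFixL, pvTailB]
    · have h1 := ih.1 c hc
      constructor
      · intro p hp
        show (if pvPunct c && p != ' ' then [' ', c] else [c]) ++ pvSp c r' = _
        rw [h1]
        simp only [pvSplitP, if_neg hc, List.flatMap_cons]
        rw [show (p != ' ') = true from by simpa using hp]
        unfold pvInsB
        split_ifs <;> simp_all
      · show (if pvPunct c && ' ' != ' ' then [' ', c] else [c]) ++ pvSp c r' = _
        rw [show (' ' != ' ') = false from rfl]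
        simp only [Bool.and_false, if_neg (by simp : ¬ (false = true)), List.singleton_append]
        rw [h1]
        simp [pvSplitP, hc, pvFixL]

-- ===== VERDICT (by name: the statement is the Claim_ definition above) =====
set_option maxHeartbeats 1000000 in
theorem preprocess_nmt_spec : Claim_equal_preprocess_nmt := by
  intro text _
  unfold Spec_preprocess_nmt preprocess_nmt preprocess_nmt_alt
  simp only []
  rw [show (" ".toList) = [' '] from rfl]
  cases h : (PySem.Str.lower (PySem.Str.replace (PySem.Str.replace text "\u202f" " ") "\u00a0" " ")).toList with
  | nil =>
    rw [pvSplit_eq]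
    simp [PySem.List.enumerate, pvSplitP, pvFix_eq, pvFixL]
  | cons c0 rest =>
    rw [pvSplit_eq, List.map_cons, pvJoinSpace]
    refine congrArg String.ofList ?_
    rw [pvJoinFlatten, ← List.flatMap_def]
    rw [PySem.List.enumerate_cons]
    rw [List.flatMap_cons]
    have hhead : (if (0 : Int) > 0 ∧ pvNoSpace c0 (PySem.List.pyGetD (c0 :: rest) ((0:Int) - 1) ' ')
        then ([' ', c0] : List Char) else [c0]) = [c0] := by
      simp
    rw [hhead]
    have hcore := pvCore rest [] c0
    simp only [List.length_nil, Nat.cast_zero, zero_add, List.nil_append] at hcore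
    rw [show ((0:Int) + 1) = 1 from by norm_num]
    refine Eq.trans (congrArg (fun l => [c0] ++ l) hcore) ?_
    have hmapfix : ((pvSplitP (c0 :: rest)).2.map pvFix).flatMap (fun t => ' ' :: t)
        = pvTailB (pvSplitP (c0 :: rest)).2 := by
      unfold pvTailB
      rw [List.flatMap_map]
      simp [pvFix_eq]
    by_cases hc : c0 = ' '
    · subst hc
      simp only [pvSplitP, if_true] at hmapfix ⊢
      rw [pvFix_eq]
      show ' ' :: pvSp ' ' rest = pvFixL [] ++ _
      rw [(pvMain rest).2, hmapfix]
      simp [pvFixL, pvTailB]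
    · simp only [pvSplitP, if_neg hc] at hmapfix ⊢
      rw [pvFix_eq]
      show c0 :: pvSp c0 rest = pvFixL (c0 :: (pvSplitP rest).1) ++ _
      rw [(pvMain rest).1 c0 hc]
      rw [hmapfix]
      simp [pvFixL]
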